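-- pv_equiv track=rewrite | github.com/baptjl/final_project | final-project_finmod-main/src/finmod/modeler.py | _find_row_index_by_label
-- ===== SOURCE A (Python) =====
-- from typing import Dict, Iterable, List, Mapping, MutableMapping, Tuple
--
-- def _norm_label(text: str) -> str:
--     """Normalize label text for loose matching (collapse whitespace, lower-case)."""
--     return " ".join(text.split()).lower()
--
-- def _find_row_index_by_label(
--     grid: Mapping[int, Mapping[str, str]], label: str, label_col: str = "C"
-- ) -> int:
--     target = _norm_label(label)
--     for row_idx, cols in sorted(grid.items()):
--         if _norm_label(str(cols.get(label_col, ""))) == target: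
--             return row_idx
--     raise KeyError(f"Label '{label}' not found in column {label_col}.")
-- ===== SOURCE B (Python) =====
-- def _norm_label(text: str) -> str:
--     """Normalize label text for loose matching (collapse whitespace, lower-case)."""
--     return " ".join(text.split()).lower()
--
--
-- def _find_row_index_by_label(grid, label, label_col="C"):
--     target = _norm_label(label)
--     best = None
--     for row_idx, cols in grid.items():
--         if _norm_label(str(cols.get(label_col, ""))) == target:
--             if best is None or row_idx < best:
--                 best = row_idx
--     if best is None:
--         raise KeyError(f"Label '{label}' not found in column {label_col}.")
--     return best
-- ===== Notes on version B (the rewrite author's own statement) =====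
-- stated objective: alternative
-- what changed: B drops A's sort of the dict items and instead makes one pass over the rows in natural order, tracking the smallest matching row index; the KeyError on no match is unchanged.
import Mathlib
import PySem

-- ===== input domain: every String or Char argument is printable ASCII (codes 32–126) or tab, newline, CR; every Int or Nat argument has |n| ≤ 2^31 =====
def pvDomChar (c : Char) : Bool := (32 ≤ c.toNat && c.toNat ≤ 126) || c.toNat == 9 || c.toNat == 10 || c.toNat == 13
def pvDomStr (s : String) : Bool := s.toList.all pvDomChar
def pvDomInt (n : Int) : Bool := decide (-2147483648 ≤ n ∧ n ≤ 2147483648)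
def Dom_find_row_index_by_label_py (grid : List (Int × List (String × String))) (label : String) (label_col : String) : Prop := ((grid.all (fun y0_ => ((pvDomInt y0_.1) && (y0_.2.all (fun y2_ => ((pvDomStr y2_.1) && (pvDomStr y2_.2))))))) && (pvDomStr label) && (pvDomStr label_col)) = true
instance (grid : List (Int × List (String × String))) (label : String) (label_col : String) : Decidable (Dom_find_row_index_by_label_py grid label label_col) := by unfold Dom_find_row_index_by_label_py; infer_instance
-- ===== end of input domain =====

-- B drops A's sort of the rows and instead scans the dict once, tracking the smallest
-- matching row index (objective: alternative single-pass algorithm; O(n·s) vs O(n log n·s)).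

-- _norm_label(text) = " ".join(text.split()).lower()
def pvNormLabel (text : String) : String :=
  PySem.Str.lower (PySem.Str.join " " (PySem.Str.split₀ text))

-- _norm_label(str(cols.get(label_col, ""))) == target  (str() is the identity on str values)
def pvRowMatches (target label_col : String) (p : Int × List (String × String)) : Bool :=
  pvNormLabel ((PySem.Dict.mk p.2).getD label_col "") == target

-- ===== PORT A =====
-- the 'for row_idx, cols in sorted(grid.items()): if …: return row_idx' loop;
-- the fall-through [] case is Python's 'raise KeyError' — excluded by Pre_, returns 0
def pvFindLoopA (target label_col : String) : List (Int × List (String × String)) → Int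
  | [] => 0
  | p :: rest =>
    if pvRowMatches target label_col p then p.1 else pvFindLoopA target label_col rest

def find_row_index_by_label_py (grid : List (Int × List (String × String))) (label : String) (label_col : String) : Int :=
  pvFindLoopA (pvNormLabel label) label_col (PySem.List.sorted grid (fun p => p.1) false)

-- ===== PORT B =====
-- B's loop body: on a match, best = row_idx if best is None or row_idx < best
def pvStepB (target label_col : String) (best : Option Int) (p : Int × List (String × String)) : Option Int :=
  if pvRowMatches target label_col p then
    match best with
    | none => some p.1
    | some b => if p.1 < b then some p.1 else some b
  else best

def find_row_index_by_label_py_alt (grid : List (Int × List (String × String))) (label : String) (label_col : String) : Int :=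
  match grid.foldl (pvStepB (pvNormLabel label) label_col) none with
  | none => 0   -- Python B: raise KeyError — excluded by Pre_
  | some b => b

-- ===== PRECONDITION & SPEC =====
-- Pre_ holds exactly when some row's label column matches the normalized label;
-- otherwise Python A (and B) raise KeyError, so those inputs are excluded.
def Pre_find_row_index_by_label_py (grid : List (Int × List (String × String))) (label : String) (label_col : String) : Prop :=
  ∃ p ∈ grid, pvRowMatches (pvNormLabel label) label_col p = true
instance (grid : List (Int × List (String × String))) (label : String) (label_col : String) : Decidable (Pre_find_row_index_by_label_py grid label label_col) := by unfold Pre_find_row_index_by_label_py; infer_instance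

def pvWitness_find_row_index_by_label_py : (List (Int × List (String × String))) × String × String :=
  ([(0, [("C", "x")])], "x", "C")

def Spec_find_row_index_by_label_py (grid : List (Int × List (String × String))) (label : String) (label_col : String) (out : Int) : Prop := out = find_row_index_by_label_py_alt grid label label_col
instance (grid : List (Int × List (String × String))) (label : String) (label_col : String) (out : Int) : Decidable (Spec_find_row_index_by_label_py grid label label_col out) := by unfold Spec_find_row_index_by_label_py; infer_instance

-- ===== CLAIM (what is proved, stated in full; the proofs are below) =====
def Claim_equal_find_row_index_by_label_py : Prop := ∀ (grid : List (Int × List (String × String))) (label : String) (label_col : String), Dom_find_row_index_by_label_py grid label label_col → Pre_find_row_index_by_label_py grid label label_col → Spec_find_row_index_by_label_py grid label label_col (find_row_index_by_label_py grid label label_col)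

-- ===== LEMMAS AND PROOFS =====

-- A's loop returns the key of the first matching item.
theorem pvFindLoopA_eq_filter (t lc : String) (l : List (Int × List (String × String))) :
    pvFindLoopA t lc l = match l.filter (pvRowMatches t lc) with
      | [] => 0
      | p :: _ => p.1 := by
  induction l with
  | nil => rfl
  | cons x xs ih =>
    by_cases h : pvRowMatches t lc x = true <;>
      simp [pvFindLoopA, h, ih]

-- B's fold from a running minimum b is the min-fold over the matching keys.
theorem pvFoldB_some (t lc : String) (l : List (Int × List (String × String))) (b : Int) :
    l.foldl (pvStepB t lc) (some b)
      = some (((l.filter (pvRowMatches t lc)).map (·.1)).foldl min b) := by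
  induction l generalizing b with
  | nil => rfl
  | cons x xs ih =>
    by_cases h : pvRowMatches t lc x = true
    · have hmin : (if x.1 < b then some x.1 else some b) = some (min b x.1) := by
        rw [Int.min_def]; split_ifs <;> simp <;> omega
      simp only [List.foldl_cons, pvStepB, h, if_pos, List.filter_cons_of_pos h, List.map_cons,
        hmin, ih, List.foldl_cons]
    · simp [List.foldl_cons, pvStepB, h, List.filter_cons_of_neg, ih]

theorem pvFoldB_none (t lc : String) (l : List (Int × List (String × String))) :
    l.foldl (pvStepB t lc) none
      = match l.filter (pvRowMatches t lc) with
        | [] => none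
        | p :: rest => some ((rest.map (·.1)).foldl min p.1) := by
  induction l with
  | nil => rfl
  | cons x xs ih =>
    by_cases h : pvRowMatches t lc x = true
    · simp only [List.foldl_cons, pvStepB, h, if_pos, List.filter_cons_of_pos h]
      exact pvFoldB_some t lc xs x.1
    · simp [List.foldl_cons, pvStepB, h, List.filter_cons_of_neg, ih]

-- the min-fold lands on b or an element of ks, and is a lower bound of both
theorem pvMinFold (ks : List Int) (b : Int) :
    (ks.foldl min b = b ∨ ks.foldl min b ∈ ks) ∧
      ks.foldl min b ≤ b ∧ ∀ k ∈ ks, ks.foldl min b ≤ k := by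
  induction ks generalizing b with
  | nil => simp
  | cons k ks ih =>
    obtain ⟨hmem, hle, hall⟩ := ih (min b k)
    refine ⟨?_, ?_, ?_⟩
    · rcases hmem with h | h
      · rw [List.foldl_cons, h, Int.min_def]
        by_cases hbk : b ≤ k
        · simp [hbk]
        · simp [hbk]
      · exact Or.inr (List.mem_cons_of_mem _ h)
    · exact le_trans hle (min_le_left _ _)
    · intro j hj
      rcases List.mem_cons.mp hj with rfl | hj
      · exact le_trans hle (min_le_right _ _)
      · exact hall j hj

-- ===== VERDICT (by name: the statement is the Claim_ definition above) =====
theorem find_row_index_by_label_py_spec : Claim_equal_find_row_index_by_label_py := by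
  intro grid label lc _ hpre
  unfold Spec_find_row_index_by_label_py find_row_index_by_label_py find_row_index_by_label_py_alt
  set t := pvNormLabel label with ht
  set q := pvRowMatches t lc with hq
  obtain ⟨w, hwmem, hwq⟩ := hpre
  have hF : grid.filter q ≠ [] := by
    intro h
    have := List.filter_eq_nil_iff.mp h w hwmem
    simp only [hq, ht] at this
    exact this hwq
  have hperm : (PySem.List.sorted grid (fun p => p.1) false).Perm grid :=
    PySem.List.sorted_perm grid (fun p => p.1) false
  have hfperm : ((PySem.List.sorted grid (fun p => p.1) false).filter q).Perm (grid.filter q) :=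
    hperm.filter q
  have hpair : ((PySem.List.sorted grid (fun p => p.1) false).filter q).Pairwise
      (fun a b => a.1 ≤ b.1) :=
    (PySem.List.sorted_pairwise grid (fun p => p.1)).filter q
  rw [pvFindLoopA_eq_filter, pvFoldB_none]
  cases hFg : grid.filter q with
  | nil => exact absurd hFg hF
  | cons p rest =>
    cases hFs : (PySem.List.sorted grid (fun p => p.1) false).filter q with
    | nil =>
      rw [hFs, hFg] at hfperm
      exact absurd hfperm.symm (by simp)
    | cons p0 rest0 =>
      simp only
      -- B's value m
      obtain ⟨hmem, _, hall⟩ := pvMinFold (rest.map (·.1)) p.1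
      set m := (rest.map (·.1)).foldl min p.1 with hm
      -- m is the key of some matching row
      have hmF : ∃ x ∈ grid.filter q, x.1 = m := by
        rcases hmem with h | h
        · exact ⟨p, by rw [hFg]; exact List.mem_cons_self, h.symm⟩
        · obtain ⟨x, hx, hx1⟩ := List.mem_map.mp h
          exact ⟨x, by rw [hFg]; exact List.mem_cons_of_mem _ hx, hx1⟩
      -- m is ≤ every matching key
      have hmlow : ∀ x ∈ grid.filter q, m ≤ x.1 := by
        intro x hx
        rw [hFg] at hx
        rcases List.mem_cons.mp hx with rfl | hx
        · rcases hmem with h | h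
          · omega
          · obtain ⟨_, _, _⟩ := pvMinFold (rest.map (·.1)) x.1
            exact (pvMinFold (rest.map (·.1)) x.1).2.1
        · exact hall x.1 (List.mem_map.mpr ⟨x, hx, rfl⟩)
      -- p0 is ≤ every matching key, and is a matching key
      have hp0mem : p0 ∈ grid.filter q := hfperm.mem_iff.mp (by rw [hFs]; exact List.mem_cons_self)
      have hp0low : ∀ x ∈ grid.filter q, p0.1 ≤ x.1 := by
        intro x hx
        have hx' : x ∈ (PySem.List.sorted grid (fun p => p.1) false).filter q :=
          hfperm.mem_iff.mpr hx
        rw [hFs] at hx'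
        rcases List.mem_cons.mp hx' with rfl | hx'
        · exact le_refl _
        · rw [hFs] at hpair
          exact (List.pairwise_cons.mp hpair).1 x hx'
      obtain ⟨x, hxF, hx1⟩ := hmF
      have h1 : p0.1 ≤ m := hx1 ▸ hp0low x hxF
      have h2 : m ≤ p0.1 := hmlow p0 hp0mem
      omega
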